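-- pv_equiv track=rewrite | github.com/ikokkari/PythonProblems | labs109.py | prominences
-- ===== SOURCE A (Python) =====
-- def prominences(height):
--     spots, m = [], -1
--     for (i, e) in enumerate(height):
--         left = height[i - 1] if i > 0 else 0
--         right = height[i + 1] if i < len(height) - 1 else 0
--         if left > e < right or left < e > right:
--             spots.append(i)
--         m = max(m, e)
--     result = []
--     for (j, i) in enumerate(spots):
--         if height[i] == m:
--             result.append((i, m, m))
--         else:
--             curr = height[i]
--             k, left_low, right_low = j - 1, curr, curr
--             while k >= -1:
--                 e = height[spots[k]] if k >= 0 else 0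
--                 if e > curr:
--                     break
--                 left_low = min(left_low, e)
--                 k -= 1
--             k = j + 1
--             while k <= len(spots):
--                 e = height[spots[k]] if k < len(spots) else 0
--                 if e > curr:
--                     break
--                 right_low = min(right_low, e)
--                 k += 1
--             prom = curr - max(left_low, right_low)
--             if prom > 0:
--                 result.append((i, curr, prom))
--     return result
-- ===== SOURCE B (Python) =====
-- def prominences(height):
--     n = len(height)
--     spots = [i for i in range(n)
--              if ((height[i-1] if i > 0 else 0) > height[i] < (height[i+1] if i < n-1 else 0))
--              or ((height[i-1] if i > 0 else 0) < height[i] > (height[i+1] if i < n-1 else 0))]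
--     m = max([-1, *height])
--     vs = [height[i] for i in spots]
--
--     def pass_lows(values):
--         # monotonic stack of (record value, min of the block it absorbed);
--         # the bottom entry (0, 0) is the virtual 0 beyond the boundary
--         stack = [(0, 0)]
--         lows = []
--         for v in values:
--             low = v
--             while stack and stack[-1][0] <= v:
--                 low = min(low, stack.pop()[1])
--             lows.append(low)
--             stack.append((v, low))
--         return lows
--
--     left_low = pass_lows(vs)
--     right_low = pass_lows(vs[::-1])[::-1]
--     result = []
--     for i, v, ll, rl in zip(spots, vs, left_low, right_low):
--         if v == m:
--             result.append((i, m, m))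
--         else:
--             prom = v - max(ll, rl)
--             if prom > 0:
--                 result.append((i, v, prom))
--     return result
-- ===== Notes on version B (the rewrite author's own statement) =====
-- stated objective: faster
-- what changed: A rescans the extrema list left and right from every candidate peak until it meets a higher one (quadratic in the number of extrema); B computes all left and right saddle minima in two monotonic-stack sweeps over the extrema values, so each value is pushed and popped once.
import Mathlib
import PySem

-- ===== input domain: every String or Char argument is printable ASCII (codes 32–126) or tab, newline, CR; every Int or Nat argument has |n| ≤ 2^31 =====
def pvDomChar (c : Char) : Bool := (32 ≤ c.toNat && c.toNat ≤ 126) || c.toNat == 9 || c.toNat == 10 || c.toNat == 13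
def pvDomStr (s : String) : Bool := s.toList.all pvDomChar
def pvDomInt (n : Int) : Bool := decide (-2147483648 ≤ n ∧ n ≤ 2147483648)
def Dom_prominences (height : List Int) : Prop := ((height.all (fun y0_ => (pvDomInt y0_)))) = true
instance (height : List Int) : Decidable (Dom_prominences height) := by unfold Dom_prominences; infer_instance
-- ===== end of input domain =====

-- B replaces A's per-peak quadratic left/right rescans of the extrema list by two
-- monotonic-stack sweeps that compute every saddle minimum in one pass each (objective: faster).

-- ===== PORT A =====
-- the inner `while k >= -1` loop of A (left scan over the spots list, sentinel 0 at k = -1)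
def pvWhileLeft (height spots : List Int) (curr : Int) (k left_low : Int) : Int :=
  if _h : -1 ≤ k then
    let e : Int := if 0 ≤ k then PySem.List.pyGetD height (PySem.List.pyGetD spots k 0) 0 else 0
    if e > curr then left_low
    else pvWhileLeft height spots curr (k - 1) (min left_low e)
  else left_low
termination_by (k + 2).toNat
decreasing_by omega

-- the inner `while k <= len(spots)` loop of A (right scan, sentinel 0 at k = len(spots))
def pvWhileRight (height spots : List Int) (curr : Int) (k right_low : Int) : Int :=
  if _h : k ≤ (spots.length : Int) then
    let e : Int := if k < (spots.length : Int) then PySem.List.pyGetD height (PySem.List.pyGetD spots k 0) 0 else 0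
    if e > curr then right_low
    else pvWhileRight height spots curr (k + 1) (min right_low e)
  else right_low
termination_by ((spots.length : Int) + 1 - k).toNat
decreasing_by omega

-- body of A's second loop, `for (j, i) in enumerate(spots)`
def pvStepA (height spots : List Int) (m : Int) (result : List (Int × Int × Int)) (p : Int × Int) :
    List (Int × Int × Int) :=
  let j := p.1
  let i := p.2
  if PySem.List.pyGetD height i 0 = m then result ++ [(i, m, m)]
  else
    let curr := PySem.List.pyGetD height i 0
    let left_low := pvWhileLeft height spots curr (j - 1) curr
    let right_low := pvWhileRight height spots curr (j + 1) curr
    let prom := curr - max left_low right_low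
    if prom > 0 then result ++ [(i, curr, prom)] else result

def prominences (height : List Int) : List (Int × Int × Int) :=
  let fst := (PySem.List.enumerate height).foldl
    (fun (s : List Int × Int) p =>
      let i := p.1
      let e := p.2
      let left := if 0 < i then PySem.List.pyGetD height (i - 1) 0 else 0
      let right := if i < (height.length : Int) - 1 then PySem.List.pyGetD height (i + 1) 0 else 0
      ((if (left > e ∧ e < right) ∨ (left < e ∧ e > right) then s.1 ++ [i] else s.1),
       max s.2 e))
    ([], -1)
  let spots := fst.1
  let m := fst.2
  (PySem.List.enumerate spots).foldl (pvStepA height spots m) []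

-- ===== PORT B =====
-- `while stack and stack[-1][0] <= v: low = min(low, stack.pop()[1])` ; top of stack = head
def pvPopLow (st : List (Int × Int)) (v low : Int) : Int × List (Int × Int) :=
  match st with
  | [] => (low, [])
  | (sv, smn) :: rest => if sv ≤ v then pvPopLow rest v (min low smn) else (low, (sv, smn) :: rest)

-- loop body of pass_lows: state = (stack, lows so far)
def pvPassStep (s : List (Int × Int) × List Int) (v : Int) : List (Int × Int) × List Int :=
  let q := pvPopLow s.1 v v
  ((v, q.1) :: q.2, s.2 ++ [q.1])

def pvPassLows (values : List Int) : List Int :=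
  (values.foldl pvPassStep ([(0, 0)], [])).2

-- body of B's final loop over zip(spots, vs, left_low, right_low)
def pvStepB (m : Int) (result : List (Int × Int × Int)) (q : Int × Int × Int × Int) :
    List (Int × Int × Int) :=
  let i := q.1
  let v := q.2.1
  let ll := q.2.2.1
  let rl := q.2.2.2
  if v = m then result ++ [(i, m, m)]
  else
    let prom := v - max ll rl
    if prom > 0 then result ++ [(i, v, prom)] else result

def prominences_alt (height : List Int) : List (Int × Int × Int) :=
  let n := height.length
  let spots := (PySem.List.pyRange 0 (n : Int) 1).filter (fun i =>
    let hi := PySem.List.pyGetD height i 0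
    let left := if 0 < i then PySem.List.pyGetD height (i - 1) 0 else 0
    let right := if i < (n : Int) - 1 then PySem.List.pyGetD height (i + 1) 0 else 0
    decide ((left > hi ∧ hi < right) ∨ (left < hi ∧ hi > right)))
  let m := (PySem.List.max? ((-1) :: height) (fun x => x)).getD 0
  let vs := spots.map (fun i => PySem.List.pyGetD height i 0)
  let left_low := pvPassLows vs
  let right_low := (pvPassLows vs.reverse).reverse   -- vs[::-1] is reverse (PySem.List.slice?_none_none_neg_one)
  (spots.zip (vs.zip (left_low.zip right_low))).foldl (pvStepB m) []

-- ===== PRECONDITION & SPEC =====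
def Spec_prominences (height : List Int) (out : List (Int × Int × Int)) : Prop := out = prominences_alt height
instance (height : List Int) (out : List (Int × Int × Int)) : Decidable (Spec_prominences height out) := by unfold Spec_prominences; infer_instance

-- ===== CLAIM (what is proved, stated in full; the proofs are below) =====
def Claim_equal_prominences : Prop := ∀ (height : List Int), Dom_prominences height → Spec_prominences height (prominences height)

-- ===== LEMMAS AND PROOFS =====

-- the value of A's break-at-first-larger minimum scan, as a function of the scanned list
def scanMin (L : List Int) (curr acc : Int) : Int :=
  match L with
  | [] => acc
  | e :: rest => if e > curr then acc else scanMin rest curr (min acc e)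

-- the sequence of left-scan results along a list, L = already-seen values most recent first
def specLows (L : List Int) (values : List Int) : List Int :=
  match values with
  | [] => []
  | v :: rest => scanMin L v v :: specLows (v :: L) rest

-- stack representation invariant: each entry (v, mn) stands for a block v :: C of scanned
-- values whose elements are all ≤ v and whose running minimum is mn
inductive pvRep : List (Int × Int) → List Int → Prop
  | nil : pvRep [] []
  | cons (v : Int) (C : List Int) (mn : Int) (st' : List (Int × Int)) (L' : List Int)
      (hC : ∀ x ∈ C, x ≤ v) (hmn : mn = C.foldl min v) (h : pvRep st' L') :
      pvRep ((v, mn) :: st') (v :: (C ++ L'))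

lemma foldl_min_comm (C : List Int) (acc v : Int) :
    C.foldl min (min acc v) = min acc (C.foldl min v) := by
  induction C generalizing acc v with
  | nil => simp
  | cons x C ih =>
    simp only [List.foldl_cons]
    rw [min_assoc, ih, ih v x]

lemma scanMin_skip (C : List Int) (curr : Int) (hC : ∀ x ∈ C, x ≤ curr) (L : List Int) (acc : Int) :
    scanMin (C ++ L) curr acc = scanMin L curr (C.foldl min acc) := by
  induction C generalizing acc with
  | nil => simp
  | cons x C ih =>
    have hx : x ≤ curr := hC x (by simp)
    simp only [List.cons_append, scanMin, List.foldl_cons]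
    rw [if_neg (by omega)]
    exact ih (fun y hy => hC y (by simp [hy])) _

lemma popLow_spec {st : List (Int × Int)} {L : List Int} (hrep : pvRep st L) (curr acc : Int) :
    ∃ C st' L', pvPopLow st curr acc = (C.foldl min acc, st') ∧ L = C ++ L' ∧
      (∀ x ∈ C, x ≤ curr) ∧ pvRep st' L' ∧ (∀ h t, L' = h :: t → curr < h) := by
  induction hrep generalizing acc with
  | nil =>
    exact ⟨[], [], [], rfl, rfl, by simp, pvRep.nil, by simp⟩
  | cons v C mn st0 L0 hC hmn h ih =>
    by_cases hv : v ≤ curr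
    · obtain ⟨C', st', L', heq, hL0, hC', hrep', hhd⟩ := ih (min acc mn)
      refine ⟨v :: (C ++ C'), st', L', ?_, ?_, ?_, hrep', hhd⟩
      · simp only [pvPopLow, if_pos hv]
        rw [heq]
        congr 1
        simp only [List.foldl_cons, List.foldl_append]
        rw [foldl_min_comm C acc v, ← hmn, foldl_min_comm C' acc mn]
      · simp [hL0, List.append_assoc]
      · intro x hx
        rcases List.mem_cons.1 hx with h1 | h2
        · omega
        · rcases List.mem_append.1 h2 with h3 | h4
          · exact le_trans (hC x h3) hv
          · exact hC' x h4
    · refine ⟨[], (v, mn) :: st0, v :: (C ++ L0), ?_, rfl, by simp, pvRep.cons v C mn st0 L0 hC hmn h, ?_⟩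
      · simp [pvPopLow, hv]
      · intro h' t ht
        injection ht with h1 _
        omega

lemma scanMin_of_rep {st : List (Int × Int)} {L : List Int} (hrep : pvRep st L) (curr acc : Int) :
    scanMin L curr acc = (pvPopLow st curr acc).1 := by
  obtain ⟨C, st', L', heq, hL, hC, _, hhd⟩ := popLow_spec hrep curr acc
  rw [heq, hL, scanMin_skip C curr hC L' acc]
  cases L' with
  | nil => rfl
  | cons h t => simp [scanMin, hhd h t rfl]

lemma passStep_rep {st : List (Int × Int)} {L : List Int} (hrep : pvRep st L) (v : Int) :
    pvRep ((v, (pvPopLow st v v).1) :: (pvPopLow st v v).2) (v :: L) := by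
  obtain ⟨C, st', L', heq, hL, hC, hrep', _⟩ := popLow_spec hrep v v
  rw [heq, hL]
  exact pvRep.cons v C (C.foldl min v) st' L' hC rfl hrep'

lemma foldl_passStep (values : List Int) : ∀ (st : List (Int × Int)) (L : List Int) (acc : List Int),
    pvRep st L → (values.foldl pvPassStep (st, acc)).2 = acc ++ specLows L values := by
  induction values with
  | nil => intro st L acc _; simp [specLows]
  | cons v rest ih =>
    intro st L acc hrep
    simp only [List.foldl_cons, pvPassStep]
    rw [ih _ (v :: L) _ (passStep_rep hrep v), ← scanMin_of_rep hrep v v]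
    simp [specLows]

lemma rep_init : pvRep [(0, 0)] [0] := by
  have := pvRep.cons 0 [] 0 [] [] (by simp) (by simp) pvRep.nil
  simpa using this

lemma passLows_eq (values : List Int) : pvPassLows values = specLows [0] values := by
  unfold pvPassLows
  rw [foldl_passStep values _ _ _ rep_init]
  simp

lemma length_specLows (values L : List Int) : (specLows L values).length = values.length := by
  induction values generalizing L with
  | nil => rfl
  | cons v rest ih => simp [specLows, ih]

lemma specLows_get (values : List Int) : ∀ (L : List Int) (j : Nat) (h : j < values.length),
    (specLows L values)[j]'(by rw [length_specLows]; exact h) =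
      scanMin ((values.take j).reverse ++ L) (values[j]) (values[j]) := by
  induction values with
  | nil => intro L j h; simp at h
  | cons v rest ih =>
    intro L j h
    cases j with
    | zero => simp [specLows]
    | succ j =>
      simp only [specLows, List.getElem_cons_succ, List.take_succ_cons, List.reverse_cons,
        List.append_assoc, List.singleton_append]
      exact ih (v :: L) j (by simpa using h)

-- A's left while-loop computes scanMin of the reversed prefix plus the 0 sentinel
lemma whileLeft_eq (height spots : List Int) (curr : Int) (vs : List Int)
    (hvs : vs = spots.map (fun i => PySem.List.pyGetD height i 0)) :
    ∀ (t : Nat), t ≤ vs.length → ∀ acc,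
      pvWhileLeft height spots curr ((t : Int) - 1) acc =
        scanMin ((vs.take t).reverse ++ [0]) curr acc := by
  intro t
  induction t with
  | zero =>
    intro _ acc
    have h0 : ((0 : Nat) : Int) - 1 = -1 := by norm_num
    rw [h0, pvWhileLeft, dif_pos (by omega)]
    simp only [show ¬((0 : Int) ≤ -1) by omega, if_false, List.take_zero, List.reverse_nil,
      List.nil_append, scanMin]
    split
    · rfl
    · rw [pvWhileLeft, dif_neg (by omega)]
  | succ t ih =>
    intro ht acc
    have htlen : t < spots.length := by rw [hvs] at ht; simpa using ht
    have hvslen : t < vs.length := by omega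
    have hk : ((t + 1 : Nat) : Int) - 1 = ((t : Nat) : Int) := by push_cast; omega
    rw [hk, pvWhileLeft, dif_pos (by omega)]
    have he : PySem.List.pyGetD height (PySem.List.pyGetD spots ((t : Nat) : Int) 0) 0 = vs[t] := by
      rw [PySem.List.pyGetD_natCast, List.getD_eq_getElem _ _ htlen]
      simp [hvs]
    simp only [show ((0 : Int) ≤ ((t : Nat) : Int)) by omega, if_true, he]
    rw [List.take_add_one, List.getElem?_eq_getElem hvslen]
    simp only [Option.toList_some, List.reverse_append, List.reverse_singleton,
      List.cons_append, scanMin]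
    split
    · rfl
    · rw [show ((t : Nat) : Int) - 1 = ((t : Nat) : Int) - 1 from rfl]
      exact ih (by omega) (min acc vs[t])

-- A's right while-loop computes scanMin of the suffix plus the 0 sentinel
lemma whileRight_eq (height spots : List Int) (curr : Int) (vs : List Int)
    (hvs : vs = spots.map (fun i => PySem.List.pyGetD height i 0)) :
    ∀ (t : Nat), t ≤ vs.length → ∀ acc,
      pvWhileRight height spots curr ((vs.length - t : Nat) : Int) acc =
        scanMin (vs.drop (vs.length - t) ++ [0]) curr acc := by
  have hlen : vs.length = spots.length := by rw [hvs]; simp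
  intro t
  induction t with
  | zero =>
    intro _ acc
    rw [pvWhileRight, dif_pos (by omega)]
    simp only [Nat.sub_zero, List.drop_length, List.nil_append, scanMin,
      show ¬(((vs.length : Nat) : Int) < (spots.length : Int)) by omega, if_false]
    split
    · rfl
    · rw [pvWhileRight, dif_neg (by omega)]
  | succ t ih =>
    intro ht acc
    have hk : vs.length - (t + 1) < vs.length := by omega
    rw [pvWhileRight, dif_pos (by omega)]
    have he : PySem.List.pyGetD height
        (PySem.List.pyGetD spots ((vs.length - (t + 1) : Nat) : Int) 0) 0
        = vs[vs.length - (t + 1)]'hk := by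
      rw [PySem.List.pyGetD_natCast, List.getD_eq_getElem _ _ (by omega)]
      simp [hvs]
    simp only [show (((vs.length - (t + 1) : Nat) : Int) < (spots.length : Int)) by omega,
      if_true, he]
    rw [← List.getElem_cons_drop hk]
    simp only [List.cons_append, scanMin]
    split
    · rfl
    · have h1 : ((vs.length - (t + 1) : Nat) : Int) + 1 = ((vs.length - t : Nat) : Int) := by omega
      have h2 : vs.length - (t + 1) + 1 = vs.length - t := by omega
      rw [h1, h2]
      exact ih (by omega) _

-- the two ports compute the same spots list
lemma spots_eq (height : List Int) :
    ((PySem.List.enumerate height).foldl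
      (fun (s : List Int × Int) p =>
        let i := p.1
        let e := p.2
        let left := if 0 < i then PySem.List.pyGetD height (i - 1) 0 else 0
        let right := if i < (height.length : Int) - 1 then PySem.List.pyGetD height (i + 1) 0 else 0
        ((if (left > e ∧ e < right) ∨ (left < e ∧ e > right) then s.1 ++ [i] else s.1),
         max s.2 e))
      ([], -1)).1
    = (PySem.List.pyRange 0 (height.length : Int) 1).filter (fun i =>
        let hi := PySem.List.pyGetD height i 0
        let left := if 0 < i then PySem.List.pyGetD height (i - 1) 0 else 0
        let right := if i < (height.length : Int) - 1 then PySem.List.pyGetD height (i + 1) 0 else 0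
        decide ((left > hi ∧ hi < right) ∨ (left < hi ∧ hi > right))) := by
  rw [PySem.List.foldl_prod_mk
    (fun (l : List Int) (p : Int × Int) =>
      if ((if 0 < p.1 then PySem.List.pyGetD height (p.1 - 1) 0 else 0) > p.2 ∧
            p.2 < (if p.1 < (height.length : Int) - 1 then PySem.List.pyGetD height (p.1 + 1) 0 else 0)) ∨
          ((if 0 < p.1 then PySem.List.pyGetD height (p.1 - 1) 0 else 0) < p.2 ∧
            p.2 > (if p.1 < (height.length : Int) - 1 then PySem.List.pyGetD height (p.1 + 1) 0 else 0))
      then l ++ [p.1] else l)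
    (fun (m : Int) (p : Int × Int) => max m p.2)]
  have hbody : (fun (l : List Int) (p : Int × Int) =>
      if ((if 0 < p.1 then PySem.List.pyGetD height (p.1 - 1) 0 else 0) > p.2 ∧
            p.2 < (if p.1 < (height.length : Int) - 1 then PySem.List.pyGetD height (p.1 + 1) 0 else 0)) ∨
          ((if 0 < p.1 then PySem.List.pyGetD height (p.1 - 1) 0 else 0) < p.2 ∧
            p.2 > (if p.1 < (height.length : Int) - 1 then PySem.List.pyGetD height (p.1 + 1) 0 else 0))
      then l ++ [p.1] else l)
      = (fun (l : List Int) (p : Int × Int) =>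
          if (fun (p : Int × Int) => decide
            (((if 0 < p.1 then PySem.List.pyGetD height (p.1 - 1) 0 else 0) > p.2 ∧
              p.2 < (if p.1 < (height.length : Int) - 1 then PySem.List.pyGetD height (p.1 + 1) 0 else 0)) ∨
             ((if 0 < p.1 then PySem.List.pyGetD height (p.1 - 1) 0 else 0) < p.2 ∧
              p.2 > (if p.1 < (height.length : Int) - 1 then PySem.List.pyGetD height (p.1 + 1) 0 else 0)))) p = true
          then l ++ [p.1] else l) := by
    funext l p
    simp
  rw [hbody, PySem.List.foldl_append_if, PySem.List.enumerate_eq_map_pyRange height 0,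
    List.filter_map, List.map_map]
  have hlen : PySem.List.len height = (height.length : Int) := by simp [PySem.List.len]
  rw [hlen]
  have hmap : ∀ (l : List Int),
      List.map (Prod.fst ∘ fun j : Int => (j, PySem.List.pyGetD height j 0)) l = l := by
    intro l
    exact List.map_id' l
  rw [hmap]
  apply List.filter_congr
  intro j _
  rfl

-- the two ports compute the same maximum m
lemma m_eq (height : List Int) :
    ((PySem.List.enumerate height).foldl
      (fun (s : List Int × Int) p =>
        let i := p.1
        let e := p.2
        let left := if 0 < i then PySem.List.pyGetD height (i - 1) 0 else 0
        let right := if i < (height.length : Int) - 1 then PySem.List.pyGetD height (i + 1) 0 else 0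
        ((if (left > e ∧ e < right) ∨ (left < e ∧ e > right) then s.1 ++ [i] else s.1),
         max s.2 e))
      ([], -1)).2
    = (PySem.List.max? ((-1) :: height) (fun x => x)).getD 0 := by
  rw [PySem.List.foldl_prod_mk
    (fun (l : List Int) (p : Int × Int) =>
      if ((if 0 < p.1 then PySem.List.pyGetD height (p.1 - 1) 0 else 0) > p.2 ∧
            p.2 < (if p.1 < (height.length : Int) - 1 then PySem.List.pyGetD height (p.1 + 1) 0 else 0)) ∨
          ((if 0 < p.1 then PySem.List.pyGetD height (p.1 - 1) 0 else 0) < p.2 ∧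
            p.2 > (if p.1 < (height.length : Int) - 1 then PySem.List.pyGetD height (p.1 + 1) 0 else 0))
      then l ++ [p.1] else l)
    (fun (m : Int) (p : Int × Int) => max m p.2)]
  have h1 : ((PySem.List.enumerate height).foldl (fun (m : Int) (p : Int × Int) => max m p.2) (-1))
      = height.foldl max (-1) := by
    rw [← PySem.List.map_snd_enumerate height 0, List.foldl_map, PySem.List.map_snd_enumerate]
  rw [h1]
  have h2 : ∀ (xs : List Int) (a : Int),
      PySem.List.max? (a :: xs) (fun x : Int => x) = some (xs.foldl max a) := by
    intro xs
    induction xs with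
    | nil => intro a; rfl
    | cons x xs ih =>
      intro a
      have step : PySem.List.max? (a :: x :: xs) (fun y : Int => y)
          = PySem.List.max? (max a x :: xs) (fun y : Int => y) := by
        simp only [PySem.List.max?, List.foldl_cons]
        congr 1
        show (if a < x then some x else some a) = some (max a x)
        split <;> congr 1 <;> omega
      rw [step, ih (max a x)]
      simp
  rw [h2 height (-1)]
  rfl

-- the two final loops agree elementwise
lemma main_loop_eq (height : List Int) (m : Int) (spots vs left right : List Int)
    (hvs : vs = spots.map (fun i => PySem.List.pyGetD height i 0))
    (hleftlen : left.length = vs.length) (hrightlen : right.length = vs.length)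
    (hleft : ∀ (j : Nat) (h : j < vs.length),
      left[j]'(by omega) = scanMin ((vs.take j).reverse ++ [0]) (vs[j]) (vs[j]))
    (hright : ∀ (j : Nat) (h : j < vs.length),
      right[j]'(by omega) = scanMin (vs.drop (j + 1) ++ [0]) (vs[j]) (vs[j])) :
    ∀ (d : List Int) (k : Nat), d = spots.drop k → ∀ acc,
      (PySem.List.enumerate d ((k : Nat) : Int)).foldl (pvStepA height spots m) acc
        = ((spots.drop k).zip ((vs.drop k).zip ((left.drop k).zip (right.drop k)))).foldl
            (pvStepB m) acc := by
  have hvl : vs.length = spots.length := by rw [hvs]; simp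
  intro d
  induction d with
  | nil =>
    intro k h acc
    rw [← h]
    simp [PySem.List.enumerate_nil]
  | cons i d' ih =>
    intro k h acc
    have hkl : k < spots.length := by
      by_contra hc
      rw [List.drop_eq_nil_of_le (by omega)] at h
      exact List.cons_ne_nil i d' h
    have hkv : k < vs.length := by omega
    have hcons := List.getElem_cons_drop hkl
    have h2 := List.cons_eq_cons.mp (h.trans hcons.symm)
    have hik : i = spots[k] := h2.1
    have hd' : d' = spots.drop (k + 1) := h2.2
    subst hik
    have hv := List.getElem_cons_drop (show k < vs.length from hkv)
    have hl := List.getElem_cons_drop (show k < left.length by omega)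
    have hr := List.getElem_cons_drop (show k < right.length by omega)
    rw [← hcons, ← hv, ← hl, ← hr, PySem.List.enumerate_cons]
    simp only [List.zip_cons_cons, List.foldl_cons]
    have hstep : pvStepA height spots m acc (((k : Nat) : Int), spots[k])
        = pvStepB m acc (spots[k], vs[k], left[k]'(by omega), right[k]'(by omega)) := by
      simp only [pvStepA, pvStepB]
      have hhi : PySem.List.pyGetD height spots[k] 0 = vs[k] := by simp [hvs]
      rw [hhi]
      by_cases hm : vs[k] = m
      · simp [hm]
      · rw [if_neg hm, if_neg hm]
        have hL : pvWhileLeft height spots (vs[k]) (((k : Nat) : Int) - 1) (vs[k])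
            = left[k]'(by omega) := by
          rw [hleft k hkv, ← whileLeft_eq height spots (vs[k]) vs hvs k (le_of_lt hkv)]
        have hR : pvWhileRight height spots (vs[k]) (((k : Nat) : Int) + 1) (vs[k])
            = right[k]'(by omega) := by
          rw [hright k hkv]
          have hcast : (((k : Nat) : Int) + 1) = (((vs.length - (vs.length - (k + 1)) : Nat)) : Int) := by
            omega
          have ht : vs.length - (vs.length - (k + 1)) = k + 1 := by omega
          rw [hcast, whileRight_eq height spots (vs[k]) vs hvs (vs.length - (k + 1)) (by omega), ht]
        rw [hL, hR]
    rw [hstep]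
    have hcast2 : (((k : Nat) : Int) + 1) = (((k + 1 : Nat)) : Int) := by push_cast; ring
    rw [hcast2]
    exact ih (k + 1) hd' _

lemma length_passLows (values : List Int) : (pvPassLows values).length = values.length := by
  rw [passLows_eq, length_specLows]

lemma leftLows_get (vs : List Int) (j : Nat) (h : j < vs.length) :
    (pvPassLows vs)[j]'(by rw [length_passLows]; exact h)
      = scanMin ((vs.take j).reverse ++ [0]) (vs[j]) (vs[j]) := by
  rw [List.getElem_of_eq (passLows_eq vs), specLows_get vs [0] j h]

lemma rightLows_get (vs : List Int) (j : Nat) (h : j < vs.length) :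
    ((pvPassLows vs.reverse).reverse)[j]'(by rw [List.length_reverse, length_passLows, List.length_reverse]; exact h)
      = scanMin (vs.drop (j + 1) ++ [0]) (vs[j]) (vs[j]) := by
  have hlr : (pvPassLows vs.reverse).length = vs.length := by
    rw [length_passLows, List.length_reverse]
  rw [List.getElem_reverse]
  simp only [hlr]
  rw [List.getElem_of_eq (passLows_eq vs.reverse),
    specLows_get vs.reverse [0] (vs.length - 1 - j) (by rw [List.length_reverse]; omega)]
  have e1 : vs.reverse[vs.length - 1 - j]'(by rw [List.length_reverse]; omega) = vs[j] := by
    rw [List.getElem_reverse]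
    congr 1
    omega
  have e2 : (vs.reverse.take (vs.length - 1 - j)).reverse = vs.drop (j + 1) := by
    rw [List.take_reverse, List.reverse_reverse]
    congr 1
    omega
  rw [e2, e1]

-- the whole second phase of the two programs agrees, for any spots list and any m
lemma assemble (height : List Int) (m : Int) (spots : List Int) :
    (PySem.List.enumerate spots).foldl (pvStepA height spots m) []
    = (spots.zip ((spots.map (fun i => PySem.List.pyGetD height i 0)).zip
        ((pvPassLows (spots.map (fun i => PySem.List.pyGetD height i 0))).zip
         ((pvPassLows (spots.map (fun i => PySem.List.pyGetD height i 0)).reverse).reverse)))).foldl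
        (pvStepB m) [] := by
  have key := main_loop_eq height m spots
      (spots.map (fun i => PySem.List.pyGetD height i 0))
      (pvPassLows (spots.map (fun i => PySem.List.pyGetD height i 0)))
      ((pvPassLows (spots.map (fun i => PySem.List.pyGetD height i 0)).reverse).reverse)
      rfl
      (by rw [length_passLows])
      (by rw [List.length_reverse, length_passLows, List.length_reverse])
      (fun j h => leftLows_get _ j h)
      (fun j h => rightLows_get _ j h)
      spots 0 (List.drop_zero).symm []
  simpa using key

-- ===== VERDICT (by name: the statement is the Claim_ definition above) =====
theorem prominences_spec : Claim_equal_prominences := by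
  intro height _hdom
  unfold Spec_prominences
  simp only [prominences, prominences_alt, spots_eq, m_eq]
  exact assemble height _ _
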